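-- pv_equiv track=rewrite | github.com/omar-3/Euler-Project | p.87/Python/solution.py | count_expressible_numbers
-- ===== SOURCE A (Python) =====
-- from math import isqrt
--
-- def generate_primes(n):
--     sieve = [True] * n
--     sieve[0] = sieve[1] = False
--     for i in range(2, isqrt(n) + 1):
--         if sieve[i]:
--             for j in range(i * i, n, i):
--                 sieve[j] = False
--     return [x for x in range(n) if sieve[x]]
--
-- def count_expressible_numbers(limit):
--     primes = generate_primes(limit)
--
--     primes_squares = [p**2 for p in primes if p**2 < limit]
--     primes_cubes = [p**3 for p in primes if p**3 < limit]
--     primes_fourth = [p**4 for p in primes if p**4 < limit]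
--
--     expressible_numbers = set()
--
--     for square in primes_squares:
--         for cube in primes_cubes:
--             for fourth in primes_fourth:
--                 total = square + cube + fourth
--                 if total < limit:
--                     expressible_numbers.add(total)
--
--     return len(expressible_numbers)
-- ===== SOURCE B (Python) =====
-- from math import isqrt
--
-- def count_expressible_numbers(limit):
--     # every useful prime p satisfies p*p < limit, i.e. p <= isqrt(limit-1)
--     n = isqrt(max(limit - 1, 0)) + 1
--     primes = []
--     for k in range(2, n):
--         if all(k % p != 0 for p in primes if p * p <= k):
--             primes.append(k)
--     squares = [p * p for p in primes]
--     cubes = [p ** 3 for p in primes if p ** 3 < limit]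
--     fourths = [p ** 4 for p in primes if p ** 4 < limit]
--     seen = set()
--     for s in squares:
--         for c in cubes:
--             for f in fourths:
--                 t = s + c + f
--                 if t >= limit:
--                     break
--                 seen.add(t)
--     return len(seen)
-- ===== Notes on version B (the rewrite author's own statement) =====
-- stated objective: faster
-- what changed: B sieves/trial-divides for primes only up to isqrt(limit-1) instead of sieving the whole range [0, limit), and the innermost loop breaks as soon as the total reaches the limit (the fourth-power list is ascending), instead of testing every triple.
-- outside the precondition, e.g. on count_expressible_numbers(1): A raises IndexError, B returns 0; on count_expressible_numbers(0): A raises IndexError, B returns 0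
import Mathlib
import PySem

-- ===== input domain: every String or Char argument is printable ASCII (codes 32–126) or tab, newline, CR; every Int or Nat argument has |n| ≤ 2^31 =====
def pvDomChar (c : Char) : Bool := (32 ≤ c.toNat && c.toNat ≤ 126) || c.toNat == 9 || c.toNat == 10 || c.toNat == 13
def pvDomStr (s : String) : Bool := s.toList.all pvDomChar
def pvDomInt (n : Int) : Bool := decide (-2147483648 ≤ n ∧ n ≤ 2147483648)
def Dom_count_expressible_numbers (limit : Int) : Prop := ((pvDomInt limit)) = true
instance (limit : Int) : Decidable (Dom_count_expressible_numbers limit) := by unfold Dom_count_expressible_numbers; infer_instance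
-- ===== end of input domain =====

-- B sieves/divides only up to isqrt(limit-1) instead of sieving all of [0, limit) and breaks out of the
-- innermost loop as soon as the total reaches the limit: an asymptotic speed-up, same return value.

-- ===== PORT A =====
-- helper: generate_primes(n) — sieve of Eratosthenes over a list of booleans (faithful to Source A)
def generate_primes (n : Int) : List Int :=
  let sieve := List.replicate n.toNat true
  let sieve := PySem.List.pySetD sieve 0 false
  let sieve := PySem.List.pySetD sieve 1 false
  let sieve := (PySem.List.pyRange 2 ((Nat.sqrt n.toNat : Int) + 1) 1).foldl
    (fun s i =>
      if PySem.List.pyGetD s i false then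
        (PySem.List.pyRange (i * i) n i).foldl (fun s' j => PySem.List.pySetD s' j false) s
      else s) sieve
  (PySem.List.pyRange 0 n 1).filter (fun x => PySem.List.pyGetD sieve x false)

def count_expressible_numbers (limit : Int) : Int :=
  let primes := generate_primes limit
  let primes_squares := (primes.filter (fun p => p ^ 2 < limit)).map (fun p => p ^ 2)
  let primes_cubes := (primes.filter (fun p => p ^ 3 < limit)).map (fun p => p ^ 3)
  let primes_fourth := (primes.filter (fun p => p ^ 4 < limit)).map (fun p => p ^ 4)
  let expressible : PySem.Set Int :=
    primes_squares.foldl (fun e1 square =>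
      primes_cubes.foldl (fun e2 cube =>
        primes_fourth.foldl (fun e3 fourth =>
          let total := square + cube + fourth
          if total < limit then PySem.Set.add e3 total else e3) e2) e1) []
  PySem.List.len expressible

-- ===== PORT B =====
-- helper: primes below n by trial division against the primes already found (faithful to Source B)
def primesBelowTD (n : Int) : List Int :=
  (PySem.List.pyRange 2 n 1).foldl
    (fun primes k =>
      if (primes.filter (fun p => p * p ≤ k)).all (fun p => decide (PySem.Int.mod k p ≠ 0))
      then primes ++ [k] else primes) []

-- helper: the innermost 'for f in fourths: … break' loop of Source B
def addFourths (limit s c : Int) : List Int → PySem.Set Int → PySem.Set Int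
  | [], e => e
  | f :: rest, e =>
      if limit ≤ s + c + f then e
      else addFourths limit s c rest (PySem.Set.add e (s + c + f))

def count_expressible_numbers_alt (limit : Int) : Int :=
  let n : Int := (Nat.sqrt (max (limit - 1) 0).toNat : Int) + 1
  let primes := primesBelowTD n
  let squares := primes.map (fun p => p * p)
  let cubes := (primes.filter (fun p => p ^ 3 < limit)).map (fun p => p ^ 3)
  let fourths := (primes.filter (fun p => p ^ 4 < limit)).map (fun p => p ^ 4)
  let seen : PySem.Set Int :=
    squares.foldl (fun e1 s =>
      cubes.foldl (fun e2 c => addFourths limit s c fourths e2) e1) []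
  PySem.List.len seen

-- ===== PRECONDITION & SPEC =====
-- Pre_: Source A indexes sieve[0] and sieve[1], raising IndexError whenever limit <= 1, so those inputs are excluded.
def Pre_count_expressible_numbers (limit : Int) : Prop := 2 ≤ limit
instance (limit : Int) : Decidable (Pre_count_expressible_numbers limit) := by unfold Pre_count_expressible_numbers; infer_instance
def pvWitness_count_expressible_numbers : Int := 30

def Spec_count_expressible_numbers (limit : Int) (out : Int) : Prop := out = count_expressible_numbers_alt limit
instance (limit : Int) (out : Int) : Decidable (Spec_count_expressible_numbers limit out) := by unfold Spec_count_expressible_numbers; infer_instance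

-- ===== CLAIM (what is proved, stated in full; the proofs are below) =====
def Claim_equal_count_expressible_numbers : Prop := ∀ (limit : Int), Dom_count_expressible_numbers limit → Pre_count_expressible_numbers limit → Spec_count_expressible_numbers limit (count_expressible_numbers limit)

-- ===== LEMMAS AND PROOFS =====

def primesList (m : Nat) : List Int :=
  ((List.range m).filter (fun k => decide (Nat.Prime k))).map (fun k => Int.ofNat k)

lemma mem_primesList {q j : Nat} : (q : Int) ∈ primesList j ↔ q < j ∧ q.Prime := by
  simp [primesList]

lemma primesList_succ (j : Nat) :
    primesList (j + 1) = if Nat.Prime j then primesList j ++ [(j : Int)] else primesList j := by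
  simp only [primesList, List.range_succ, List.filter_append]
  by_cases hp : Nat.Prime j <;> simp [hp]

lemma TD_cond (j : Nat) (h2 : 2 ≤ j) :
    ((primesList j).filter (fun p => p * p ≤ (j : Int))).all
        (fun p => decide (PySem.Int.mod (j : Int) p ≠ 0)) = decide (Nat.Prime j) := by
  by_cases hp : Nat.Prime j
  · simp only [hp, decide_true, List.all_eq_true, List.mem_filter]
    rintro p ⟨hmem, hle⟩
    simp [primesList] at hmem
    obtain ⟨q, hq, rfl⟩ := hmem
    simp only [decide_eq_true_eq, ne_eq, PySem.Int.mod_eq_zero_iff_dvd, Int.natCast_dvd_natCast]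
    intro hdvd
    have := (Nat.prime_dvd_prime_iff_eq hq.2 hp).mp hdvd
    omega
  · simp only [hp, decide_false]
    rw [List.all_eq_false]
    set q := j.minFac with hq
    have hqp : q.Prime := Nat.minFac_prime (by omega)
    have hqd : q ∣ j := Nat.minFac_dvd j
    have hsq : q * q ≤ j := by have := Nat.minFac_sq_le_self (by omega) hp; nlinarith [sq_nonneg q]
    have hqlt : q < j := by nlinarith [hqp.two_le]
    refine ⟨(q : Int), List.mem_filter.mpr ⟨mem_primesList.mpr ⟨hqlt, hqp⟩,
      decide_eq_true (by exact_mod_cast hsq)⟩, ?_⟩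
    simp [PySem.Int.mod_eq_zero_iff_dvd, Int.natCast_dvd_natCast, hqd]

lemma TD_nat : ∀ j : Nat, (PySem.List.pyRange 2 (j : Int) 1).foldl
    (fun primes k =>
      if (primes.filter (fun p => p * p ≤ k)).all (fun p => decide (PySem.Int.mod k p ≠ 0))
      then primes ++ [k] else primes) [] = primesList j := by
  intro j
  induction j with
  | zero => rw [PySem.List.pyRange_one_eq_nil (by omega)]; rfl
  | succ j ih =>
    by_cases h2 : 2 ≤ j
    · have hcast : ((j + 1 : Nat) : Int) = (j : Int) + 1 := by push_cast; ring
      rw [hcast, PySem.List.pyRange_one_succ_right (by exact_mod_cast h2), List.foldl_append, ih]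
      simp only [List.foldl_cons, List.foldl_nil]
      rw [TD_cond j h2, primesList_succ]
      by_cases hp : Nat.Prime j <;> simp [hp]
    · interval_cases j
      · rw [PySem.List.pyRange_one_eq_nil (by omega)]; rfl
      · rw [PySem.List.pyRange_one_eq_nil (by omega)]; decide

lemma primesBelowTD_eq (m : Int) : primesBelowTD m = primesList m.toNat := by
  rcases (by omega : 0 ≤ m ∨ m < 0) with h | h
  · have hm : m = (m.toNat : Int) := by omega
    rw [primesBelowTD, hm]; exact TD_nat m.toNat
  · rw [primesBelowTD, PySem.List.pyRange_one_eq_nil (by omega)]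
    have h0 : m.toNat = 0 := by omega
    rw [h0]; rfl

lemma get_foldl_setFalse (js : List Int) (hjs : ∀ j ∈ js, 0 ≤ j) :
    ∀ (l : List Bool) (x : Nat),
      (js.foldl (fun s' j => PySem.List.pySetD s' j false) l).getD x false
        = if (x : Int) ∈ js then false else l.getD x false := by
  induction js with
  | nil => simp
  | cons j rest ih =>
    intro l x
    simp only [List.foldl_cons]
    rw [ih (fun a ha => hjs a (by simp [ha])) _ x]
    rw [PySem.List.pySetD_of_nonneg _ _ (hjs j (by simp))]
    by_cases hmem : (x : Int) ∈ rest
    · simp [hmem]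
    · simp only [hmem, if_false, List.mem_cons, or_false]
      by_cases hx : (x : Int) = j
      · have hxt : j.toNat = x := by omega
        rw [if_pos hx, ← hxt]
        rcases Nat.lt_or_ge j.toNat l.length with h | h
        · simp [List.getD, h]
        · rw [List.getD, List.getElem?_eq_none (by simpa using h)]; rfl
      · rw [if_neg hx]
        have hne : j.toNat ≠ x := by
          have := hjs j (by simp); omega
        simp [List.getD, List.getElem?_set_ne (by omega)]

lemma length_foldl_setFalse (js : List Int) :
    ∀ l : List Bool, (js.foldl (fun s' j => PySem.List.pySetD s' j false) l).length = l.length := by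
  induction js with
  | nil => simp
  | cons j rest ih => intro l; simp only [List.foldl_cons]; rw [ih, PySem.List.length_pySetD]

-- the sieve as actually iterated

def sieveStep (n : Int) (s : List Bool) (i : Int) : List Bool :=
  if PySem.List.pyGetD s i false then
    (PySem.List.pyRange (i * i) n i).foldl (fun s' j => PySem.List.pySetD s' j false) s
  else s

def sieve0 (N : Nat) : List Bool :=
  PySem.List.pySetD (PySem.List.pySetD (List.replicate N true) 0 false) 1 false

lemma get_sieve0 (N : Nat) (x : Nat) :
    (sieve0 N).getD x false = decide (2 ≤ x ∧ x < N) := by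
  have h0 : PySem.List.pySetD (List.replicate N true) 0 false
      = (List.replicate N true).set 0 false := PySem.List.pySetD_of_nonneg _ _ (by omega)
  have h1 : sieve0 N = ((List.replicate N true).set 0 false).set 1 false := by
    rw [sieve0, h0, PySem.List.pySetD_of_nonneg _ _ (by omega)]; rfl
  rw [h1]
  rcases Nat.lt_or_ge x N with h | h
  · by_cases hx0 : x = 0
    · subst hx0; simp [List.getD, List.getElem?_set, h]
    · by_cases hx1 : x = 1
      · subst hx1; simp [List.getD, List.getElem?_set, h]
      · rw [List.getD, List.getElem?_set_ne (by omega), List.getElem?_set_ne (by omega)]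
        simp [List.getElem?_replicate, h]
        omega
  · rw [List.getD, List.getElem?_eq_none (by simp; omega)]
    simp; omega

lemma length_sieve0 (N : Nat) : (sieve0 N).length = N := by
  rw [sieve0, PySem.List.pySetD_of_nonneg _ _ (by omega), PySem.List.pySetD_of_nonneg _ _ (by omega)]
  simp

def SieveInv (N m : Nat) (l : List Bool) : Prop :=
  l.length = N ∧ ∀ x : Nat,
    (l.getD x false = true ↔ (2 ≤ x ∧ x < N ∧ ∀ p, Nat.Prime p → p ≤ m → p * p ≤ x → ¬ p ∣ x))

lemma sieve_inv (n : Int) (hn : 2 ≤ n) :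
    ∀ m : Nat, 1 ≤ m → m ≤ Nat.sqrt n.toNat →
      SieveInv n.toNat m ((PySem.List.pyRange 2 ((m : Int) + 1) 1).foldl (sieveStep n) (sieve0 n.toNat)) := by
  have hN : 2 ≤ n.toNat := by omega
  intro m
  induction m with
  | zero => omega
  | succ m ih =>
    intro _ hms
    by_cases hm1 : 1 ≤ m
    case neg =>
      -- m = 0, so m+1 = 1 : range 2 2 is empty
      have : m = 0 := by omega
      subst this
      rw [PySem.List.pyRange_one_eq_nil (by norm_num)]
      simp only [List.foldl_nil]
      refine ⟨length_sieve0 _, fun x => ?_⟩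
      rw [get_sieve0]
      constructor
      · intro h
        simp at h
        refine ⟨h.1, by omega, fun p hp hple => ?_⟩
        have := hp.two_le; omega
      · rintro ⟨h1, h2, _⟩; simp [h1, h2]
    case pos =>
      have ihm := ih hm1 (by omega)
      set L := (PySem.List.pyRange 2 ((m : Int) + 1) 1).foldl (sieveStep n) (sieve0 n.toNat) with hL
      have hsplit : ((((m : Nat) + 1 : Nat) : Int) + 1) = ((m : Int) + 1) + 1 := by push_cast; ring
      rw [hsplit, PySem.List.pyRange_one_succ_right (by omega), List.foldl_append]
      simp only [List.foldl_cons, List.foldl_nil]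
      rw [← hL]
      -- i := m + 1
      set i : Nat := m + 1 with hi
      have hiN : i < n.toNat := by
        have := Nat.sqrt_lt_self (n := n.toNat) (by omega); omega
      have hcast : ((m : Int) + 1) = (i : Int) := by push_cast; omega
      rw [hcast]
      obtain ⟨hlen, hinv⟩ := ihm
      rw [sieveStep]
      rw [show PySem.List.pyGetD L (i : Int) false = L.getD i false from PySem.List.pyGetD_natCast ..]
      by_cases hg : L.getD i false = true
      case neg =>
        rw [if_neg hg]
        -- i is not prime
        have hnotp : ¬ Nat.Prime i := by
          intro hip
          exact hg ((hinv i).mpr ⟨by omega, hiN, fun p hp hple hsq hdvd => by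
            have := (Nat.prime_dvd_prime_iff_eq hp hip).mp hdvd; omega⟩)
        refine ⟨hlen, fun x => ?_⟩
        rw [hinv x]
        constructor
        · rintro ⟨h1, h2, h3⟩
          refine ⟨h1, h2, fun p hp hple hsq => ?_⟩
          rcases Nat.lt_or_ge m p with h | h
          · have : p = i := by omega
            subst this; exact absurd hp hnotp
          · exact h3 p hp h hsq
        · rintro ⟨h1, h2, h3⟩
          exact ⟨h1, h2, fun p hp hple hsq => h3 p hp (by omega) hsq⟩
      case pos =>
        rw [if_pos hg]
        -- i is prime
        have hiP : Nat.Prime i := by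
          have h := (hinv i).mp hg
          by_contra hnp
          obtain ⟨h2i, _, hall⟩ := h
          have hqp : i.minFac.Prime := Nat.minFac_prime (by omega)
          have hqd : i.minFac ∣ i := Nat.minFac_dvd i
          have hsq : i.minFac * i.minFac ≤ i := by
            have := Nat.minFac_sq_le_self (by omega) hnp; nlinarith [sq_nonneg i.minFac]
          have hlt : i.minFac < i := by nlinarith [hqp.two_le]
          exact hall i.minFac hqp (by omega) hsq hqd
        have hjs : ∀ j ∈ PySem.List.pyRange ((i : Int) * i) n i, 0 ≤ j := by
          intro j hj
          rw [PySem.List.mem_pyRange_iff_of_pos (by positivity)] at hj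
          have h1 := hj.1
          have h2 : (0 : Int) ≤ (i : Int) * i := by positivity
          omega
        refine ⟨by rw [length_foldl_setFalse]; exact hlen, fun x => ?_⟩
        rw [get_foldl_setFalse _ hjs L x]
        have hmem : ((x : Int) ∈ PySem.List.pyRange ((i : Int) * i) n i)
            ↔ (i * i ≤ x ∧ x < n.toNat ∧ i ∣ x) := by
          rw [PySem.List.mem_pyRange_iff_of_pos (by positivity)]
          constructor
          · rintro ⟨ha, hb, hc⟩
            have hdvd : (i : Int) ∣ (x : Int) := by
              have hx : (x : Int) = ((x : Int) - (i : Int) * i) + (i : Int) * i := by ring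
              rw [hx]
              exact dvd_add hc ⟨(i : Int), rfl⟩
            refine ⟨by exact_mod_cast ha, by omega, by exact_mod_cast hdvd⟩
          · rintro ⟨ha, hb, hc⟩
            refine ⟨by exact_mod_cast ha, by omega, ?_⟩
            have h1 : (i : Int) ∣ (x : Int) := by exact_mod_cast hc
            exact dvd_sub h1 ⟨(i : Int), rfl⟩
        by_cases hx : (x : Int) ∈ PySem.List.pyRange ((i : Int) * i) n i
        case pos =>
          rw [if_pos hx]
          obtain ⟨ha, hb, hc⟩ := hmem.mp hx
          simp only [Bool.false_eq_true, false_iff]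
          rintro ⟨_, _, hall⟩
          exact hall i hiP (by omega) ha hc
        case neg =>
          rw [if_neg hx, hinv x]
          rw [hmem] at hx
          constructor
          · rintro ⟨h1, h2, h3⟩
            refine ⟨h1, h2, fun p hp hple hsq => ?_⟩
            rcases Nat.lt_or_ge m p with h | h
            · have hpi : p = i := by omega
              subst hpi
              intro hdvd
              exact hx ⟨hsq, h2, hdvd⟩
            · exact h3 p hp h hsq
          · rintro ⟨h1, h2, h3⟩
            exact ⟨h1, h2, fun p hp hple hsq => h3 p hp (by omega) hsq⟩

lemma generate_primes_eq (n : Int) (hn : 2 ≤ n) :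
    generate_primes n = primesList n.toNat := by
  have hN : 2 ≤ n.toNat := by omega
  have hs1 : 1 ≤ Nat.sqrt n.toNat := Nat.le_sqrt.mpr (by omega)
  obtain ⟨hlen, hinv⟩ := sieve_inv n hn (Nat.sqrt n.toNat) hs1 le_rfl
  set S := (PySem.List.pyRange 2 ((Nat.sqrt n.toNat : Int) + 1) 1).foldl (sieveStep n) (sieve0 n.toNat) with hS
  have hrw : generate_primes n
      = (PySem.List.pyRange 0 n 1).filter (fun x => PySem.List.pyGetD S x false) := rfl
  rw [hrw, PySem.List.pyRange_zero, List.filter_map, primesList]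
  have hfc : List.filter ((fun x => PySem.List.pyGetD S x false) ∘ (fun k : Nat => (k : Int)))
        (List.range n.toNat) = List.filter (fun k => decide (Nat.Prime k)) (List.range n.toNat) := by
    apply List.filter_congr
    intro k hk
    rw [List.mem_range] at hk
    have hiff : (S.getD k false = true) ↔ Nat.Prime k := by
      rw [hinv k]
      constructor
      · rintro ⟨h2, hxN, hall⟩
        by_contra hnp
        have hqp : k.minFac.Prime := Nat.minFac_prime (by omega)
        have hqd : k.minFac ∣ k := Nat.minFac_dvd k
        have hsq : k.minFac * k.minFac ≤ k := by
          have := Nat.minFac_sq_le_self (by omega) hnp; nlinarith [sq_nonneg k.minFac]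
        have hqs : k.minFac ≤ Nat.sqrt n.toNat :=
          le_trans (Nat.le_sqrt.mpr hsq) (Nat.sqrt_le_sqrt (by omega))
        exact hall k.minFac hqp hqs hsq hqd
      · intro hp
        refine ⟨hp.two_le, hk, fun p hpp hps hsq hdvd => ?_⟩
        have := (Nat.prime_dvd_prime_iff_eq hpp hp).mp hdvd
        subst this
        have := hp.two_le
        nlinarith
    show PySem.List.pyGetD S ((k : Nat) : Int) false = decide (Nat.Prime k)
    rw [PySem.List.pyGetD_natCast, Bool.eq_iff_iff, hiff, decide_eq_true_eq]
  rw [hfc]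
  rfl

lemma filter_range_shrink (P : Nat → Bool) (M L : Nat) (h : M ≤ L)
    (hP : ∀ k, P k = true → k < M) :
    (List.range L).filter P = (List.range M).filter P := by
  obtain ⟨d, rfl⟩ := Nat.exists_eq_add_of_le h
  rw [List.range_add, List.filter_append]
  have : (List.filter P (List.map (fun x => M + x) (List.range d))) = [] := by
    rw [List.filter_eq_nil_iff]
    intro a ha
    simp only [List.mem_map] at ha
    obtain ⟨x, _, rfl⟩ := ha
    intro hPa
    have := hP _ hPa
    omega
  simp [this]

lemma addFourths_eq_foldl_aux (limit s c : Int) (fs : List Int)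
    (h : ∀ f ∈ fs, ¬ (s + c + f < limit)) (e : PySem.Set Int) :
    fs.foldl (fun e3 f => if s + c + f < limit then PySem.Set.add e3 (s + c + f) else e3) e = e := by
  induction fs generalizing e with
  | nil => rfl
  | cons f rest ih =>
    simp only [List.foldl_cons]
    rw [if_neg (h f (by simp))]
    exact ih (fun g hg => h g (by simp [hg])) e

lemma addFourths_eq_foldl (limit s c : Int) (fs : List Int)
    (hs : fs.Pairwise (· ≤ ·)) (e : PySem.Set Int) :
    addFourths limit s c fs e
      = fs.foldl (fun e3 f => if s + c + f < limit then PySem.Set.add e3 (s + c + f) else e3) e := by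
  induction fs generalizing e with
  | nil => rfl
  | cons f rest ih =>
    rw [List.pairwise_cons] at hs
    simp only [addFourths, List.foldl_cons]
    by_cases hb : limit ≤ s + c + f
    · rw [if_pos hb, if_neg (by omega)]
      exact (addFourths_eq_foldl_aux limit s c rest
        (fun g hg => by have := hs.1 g hg; omega) e).symm
    · rw [if_neg hb, if_pos (by omega)]
      exact ih hs.2 _


lemma filter_primesList (j : Nat) (q : Int → Bool) :
    (primesList j).filter q
      = ((List.range j).filter (fun k => q (Int.ofNat k) && decide (Nat.Prime k))).map
          (fun k => Int.ofNat k) := by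
  rw [primesList, List.filter_map, List.filter_filter]
  rfl

lemma sq_lt_iff (limit : Int) (hl : 2 ≤ limit) (k : Nat) :
    (Int.ofNat k) ^ 2 < limit ↔ k < Nat.sqrt (limit - 1).toNat + 1 := by
  have h1 : ((Int.ofNat k) ^ 2 : Int) = ((k * k : Nat) : Int) := by simp only [Int.ofNat_eq_natCast]; push_cast; ring
  rw [h1, Nat.lt_succ_iff, Nat.le_sqrt]
  omega

lemma prime_pow_lt (limit : Int) (hl : 2 ≤ limit) (e k : Nat) (he : 2 ≤ e) (hk : Nat.Prime k)
    (h : (Int.ofNat k) ^ e < limit) : k < Nat.sqrt (limit - 1).toNat + 1 := by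
  have h2k := hk.two_le
  have hmono : k ^ 2 ≤ k ^ e := Nat.pow_le_pow_right (by omega) he
  have hc : ((Int.ofNat k) ^ 2 : Int) ≤ (Int.ofNat k) ^ e := by
    have e1 : ((Int.ofNat k) ^ 2 : Int) = ((k ^ 2 : Nat) : Int) := by simp only [Int.ofNat_eq_natCast]; push_cast; ring
    have e2 : ((Int.ofNat k) ^ e : Int) = ((k ^ e : Nat) : Int) := by simp only [Int.ofNat_eq_natCast]; push_cast; ring
    rw [e1, e2]; exact_mod_cast hmono
  exact (sq_lt_iff limit hl k).mp (lt_of_le_of_lt hc h)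

lemma M_le_L (limit : Int) (hl : 2 ≤ limit) :
    Nat.sqrt (limit - 1).toNat + 1 ≤ limit.toNat := by
  have := Nat.sqrt_le_self (limit - 1).toNat; omega

lemma primes_pow_filter (limit : Int) (hl : 2 ≤ limit) (e : Nat) (he : 2 ≤ e) :
    (primesList limit.toNat).filter (fun p => p ^ e < limit)
      = (primesList (Nat.sqrt (limit - 1).toNat + 1)).filter (fun p => p ^ e < limit) := by
  rw [filter_primesList, filter_primesList]
  refine congrArg _ ?_
  refine filter_range_shrink _ _ _ (M_le_L limit hl) ?_
  intro k hPk
  simp only [Bool.and_eq_true, decide_eq_true_eq] at hPk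
  exact prime_pow_lt limit hl e k he hPk.2 hPk.1

lemma squares_eq (limit : Int) (hl : 2 ≤ limit) :
    ((primesList limit.toNat).filter (fun p => p ^ 2 < limit)).map (fun p => p ^ 2)
      = (primesList (Nat.sqrt (limit - 1).toNat + 1)).map (fun p => p * p) := by
  rw [primes_pow_filter limit hl 2 le_rfl]
  have hself : (primesList (Nat.sqrt (limit - 1).toNat + 1)).filter (fun p => p ^ 2 < limit)
      = primesList (Nat.sqrt (limit - 1).toNat + 1) := by
    apply List.filter_eq_self.mpr
    intro p hp
    simp [primesList] at hp
    obtain ⟨k, hk, rfl⟩ := hp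
    have heq : (limit - 1).toNat = limit.toNat - 1 := by omega
    simpa using (sq_lt_iff limit hl k).mpr (by rw [heq]; omega)
  rw [hself]
  apply List.map_congr_left
  intro p _
  ring

lemma fourths_pairwise (limit : Int) (M' : Nat) :
    (((primesList M').filter (fun p => p ^ 4 < limit)).map (fun p => p ^ 4)).Pairwise (· ≤ ·) := by
  rw [filter_primesList, List.map_map]
  refine List.pairwise_map.mpr ?_
  refine List.Pairwise.filter _ ?_
  refine (List.pairwise_lt_range (n := M')).imp ?_
  intro a b hab
  show (Int.ofNat a) ^ 4 ≤ (Int.ofNat b) ^ 4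
  have : a ^ 4 ≤ b ^ 4 := Nat.pow_le_pow_left (le_of_lt hab) 4
  have e1 : ((Int.ofNat a) ^ 4 : Int) = ((a ^ 4 : Nat) : Int) := by simp only [Int.ofNat_eq_natCast]; push_cast; ring
  have e2 : ((Int.ofNat b) ^ 4 : Int) = ((b ^ 4 : Nat) : Int) := by simp only [Int.ofNat_eq_natCast]; push_cast; ring
  rw [e1, e2]; exact_mod_cast this

lemma triple_eq (limit : Int) (SQ CB FR : List Int) (hpw : FR.Pairwise (· ≤ ·)) :
    SQ.foldl (fun e1 square => CB.foldl (fun e2 cube =>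
        FR.foldl (fun e3 fourth =>
          if square + cube + fourth < limit then PySem.Set.add e3 (square + cube + fourth) else e3)
          e2) e1) ([] : PySem.Set Int)
      = SQ.foldl (fun e1 s => CB.foldl (fun e2 c => addFourths limit s c FR e2) e1) [] := by
  have hfun : (fun (e1 : PySem.Set Int) (square : Int) => CB.foldl (fun e2 cube =>
      FR.foldl (fun e3 fourth =>
        if square + cube + fourth < limit then PySem.Set.add e3 (square + cube + fourth) else e3)
        e2) e1)
      = fun e1 s => CB.foldl (fun e2 c => addFourths limit s c FR e2) e1 := by
    funext e1 s
    have hin : (fun (e2 : PySem.Set Int) (cube : Int) => FR.foldl (fun e3 fourth =>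
        if s + cube + fourth < limit then PySem.Set.add e3 (s + cube + fourth) else e3) e2)
        = fun e2 c => addFourths limit s c FR e2 := by
      funext e2 c
      exact (addFourths_eq_foldl limit s c FR hpw e2).symm
    rw [hin]
  rw [hfun]


-- ===== VERDICT (by name: the statement is the Claim_ definition above) =====
theorem count_expressible_numbers_spec : Claim_equal_count_expressible_numbers := by
  intro limit _ hpre
  unfold Pre_count_expressible_numbers at hpre
  unfold Spec_count_expressible_numbers
  simp only [count_expressible_numbers, count_expressible_numbers_alt]
  rw [generate_primes_eq limit hpre]
  have hmax : (max (limit - 1) 0) = limit - 1 := by omega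
  rw [hmax]
  have hTD : primesBelowTD ((Nat.sqrt (limit - 1).toNat : Int) + 1)
      = primesList (Nat.sqrt (limit - 1).toNat + 1) := by
    rw [primesBelowTD_eq]
    have h : ((Nat.sqrt (limit - 1).toNat : Int) + 1).toNat = Nat.sqrt (limit - 1).toNat + 1 := by
      omega
    rw [h]
  rw [hTD]
  rw [squares_eq limit hpre, primes_pow_filter limit hpre 3 (by omega),
    primes_pow_filter limit hpre 4 (by omega)]
  exact congrArg PySem.List.len
    (triple_eq limit _ _ _ (fourths_pairwise limit (Nat.sqrt (limit - 1).toNat + 1)))
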